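-- pv_equiv track=rewrite | github.com/mchlrd/EECS1015 | PracticeProblems_FinalExam/lab9_task4.py | intersecting_chars
-- ===== SOURCE A (Python) =====
-- from typing import List
--
-- def intersecting_chars(my_str: str) -> List[str]:
--     '''
--
--     Args:
--         my_str:
--
--     Returns:
--
--     >>> intersecting_chars("ab_ab_bCC")
--     ['b']
--     >>> intersecting_chars("abc_abc_abc")
--     ['a', 'b', 'c']
--     >>> intersecting_chars("ab_b_b")
--     ['b']
--     >>> intersecting_chars("_a_a")
--     []
--     '''
--
--     assert type(my_str) == str, 'invalid argument type'
--     assert my_str.count('_') == 2, 'invalid input'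
--     assert all(char.isalpha() or char == '_' for char in my_str), 'must contain only letters'
--
--     parts = my_str.lower().split('_')
--
--     sets = [set(part) for part in parts]
--
--     intersection = set.intersection(*sets)
--
--     return sorted(intersection)
-- ===== SOURCE B (Python) =====
-- def intersecting_chars(my_str):
--     assert type(my_str) == str, 'invalid argument type'
--     assert my_str.count('_') == 2, 'invalid input'
--     assert all(char.isalpha() or char == '_' for char in my_str), 'must contain only letters'
--     # single streaming pass: no split, no sets, no sort.  For each letter keep
--     # (last part index it was seen in, number of distinct parts containing it);
--     # a letter is common to all parts iff its distinct-part count reaches 3.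
--     seen = {}
--     part = 0
--     for ch in my_str.lower():
--         if ch == '_':
--             part += 1
--         else:
--             last, cnt = seen.get(ch, (-1, 0))
--             if last != part:
--                 seen[ch] = (part, cnt + 1)
--     return [c for c in 'abcdefghijklmnopqrstuvwxyz' if c in seen and seen[c][1] == 3]
-- ===== Notes on version B (the rewrite author's own statement) =====
-- stated objective: alternative
-- what changed: Replaces split-into-parts + one set per part + variadic set.intersection + sorted by a single streaming pass over the lowered string that keeps, per letter, its last part index and a distinct-part counter, then emits letters whose counter is 3 by scanning the fixed a-z alphabet in order (no split, no sets, no sort).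
import Mathlib
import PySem

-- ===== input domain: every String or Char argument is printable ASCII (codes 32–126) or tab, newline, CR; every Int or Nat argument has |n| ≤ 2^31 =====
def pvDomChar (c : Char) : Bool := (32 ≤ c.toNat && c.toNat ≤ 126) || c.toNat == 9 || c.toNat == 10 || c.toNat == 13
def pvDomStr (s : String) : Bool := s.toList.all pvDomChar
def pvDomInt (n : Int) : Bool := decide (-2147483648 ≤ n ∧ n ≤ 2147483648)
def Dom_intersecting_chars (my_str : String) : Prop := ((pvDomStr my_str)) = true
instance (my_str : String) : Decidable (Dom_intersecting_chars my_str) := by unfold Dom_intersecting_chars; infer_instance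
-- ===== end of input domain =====

-- B replaces A's split-into-parts / one-set-per-part / variadic set.intersection / sorted
-- pipeline by a single streaming pass over the lowered string (per-letter last-part index and
-- distinct-part counter) followed by an in-order scan of the fixed a-z alphabet; same results.

-- ===== PORT A =====
def intersecting_chars (my_str : String) : List String :=
  let parts := (PySem.Str.split? (PySem.Str.lower my_str) "_").getD []
  let sets := parts.map (fun p => PySem.Set.ofList p.toList)
  let inter : PySem.Set Char :=
    match sets with
    | [] => []                 -- unreachable: split? always yields a nonempty list
    | s0 :: rest => rest.foldl (fun acc s => PySem.Set.inter acc s) s0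
  (PySem.List.sorted inter (fun c => c)).map (fun c => String.ofList [c])

-- ===== PORT B =====
-- the literal alphabet string 'abcdefghijklmnopqrstuvwxyz' B iterates over, as its character list
def pvAlpha : List Char :=
  ['a','b','c','d','e','f','g','h','i','j','k','l','m','n','o','p','q','r','s','t','u','v','w','x','y','z']

-- the body of B's for-loop: on '_' advance the part counter, otherwise update
-- (last part index, distinct-part count) for the character
def pvStep (s : PySem.Dict Char (Int × Int) × Int) (ch : Char) : PySem.Dict Char (Int × Int) × Int :=
  if ch == '_' then (s.1, s.2 + 1)
  else
    let lc := (s.1.get? ch).getD (-1, 0)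
    if lc.1 ≠ s.2 then (s.1.insert ch (s.2, lc.2 + 1), s.2) else s

def intersecting_chars_alt (my_str : String) : List String :=
  let st := (PySem.Str.lower my_str).toList.foldl pvStep (PySem.Dict.empty, 0)
  (pvAlpha.filter (fun c =>
      st.1.contains c && (((st.1.get? c).getD (-1, 0)).2 == 3))).map (fun c => String.ofList [c])

-- ===== PRECONDITION & SPEC =====
-- Pre_ excludes exactly the inputs on which A's asserts raise AssertionError:
-- strings whose '_' count is not 2 or that contain a character that is neither a letter nor '_'.
def Pre_intersecting_chars (my_str : String) : Prop :=
  my_str.toList.count '_' = 2 ∧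
  my_str.toList.all (fun c => PySem.Chars.isalpha c || c == '_') = true
instance (my_str : String) : Decidable (Pre_intersecting_chars my_str) := by
  unfold Pre_intersecting_chars; infer_instance
def pvWitness_intersecting_chars : String := "ab_ab_bCC"
def Spec_intersecting_chars (my_str : String) (out : List String) : Prop := out = intersecting_chars_alt my_str
instance (my_str : String) (out : List String) : Decidable (Spec_intersecting_chars my_str out) := by unfold Spec_intersecting_chars; infer_instance

-- ===== CLAIM (what is proved, stated in full; the proofs are below) =====
def Claim_equal_intersecting_chars : Prop := ∀ (my_str : String), Dom_intersecting_chars my_str → Pre_intersecting_chars my_str → Spec_intersecting_chars my_str (intersecting_chars my_str)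

-- ===== LEMMAS AND PROOFS =====

-- ---- characters: lowering and the alphabet ----

theorem pv_mem_alpha_iff (c : Char) : c ∈ pvAlpha ↔ 97 ≤ c.toNat ∧ c.toNat ≤ 122 := by
  constructor
  · intro h; fin_cases h <;> exact ⟨by decide, by decide⟩
  · rintro ⟨h1, h2⟩
    have hof := Char.ofNat_toNat c
    set n := c.toNat with hn
    clear_value n
    interval_cases n <;> (rw [← hof]; decide)

theorem pv_le_toNat {a b : Char} (h : a ≤ b) : a.toNat ≤ b.toNat := Fin.mk_le_mk.mp h

theorem pv_upper_bounds {c : Char} (h : PySem.Chars.isupper c = true) :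
    65 ≤ c.toNat ∧ c.toNat ≤ 90 := by
  unfold PySem.Chars.isupper at h
  simp only [Bool.and_eq_true, decide_eq_true_eq] at h
  exact ⟨pv_le_toNat h.1, pv_le_toNat h.2⟩

theorem pv_lower_bounds {c : Char} (h : PySem.Chars.islower c = true) :
    97 ≤ c.toNat ∧ c.toNat ≤ 122 := by
  unfold PySem.Chars.islower at h
  simp only [Bool.and_eq_true, decide_eq_true_eq] at h
  exact ⟨pv_le_toNat h.1, pv_le_toNat h.2⟩

theorem pv_toNat_ofNat_upper {c : Char} (h : PySem.Chars.isupper c = true) :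
    (Char.ofNat (c.toNat + 32)).toNat = c.toNat + 32 := by
  obtain ⟨h1, h2⟩ := pv_upper_bounds h
  rw [Char.toNat_ofNat, if_pos (Or.inl (by omega))]

theorem pv_lowerChar_us_iff (c : Char) : PySem.Chars.lowerChar c = '_' ↔ c = '_' := by
  unfold PySem.Chars.lowerChar
  split_ifs with h
  · obtain ⟨h1, h2⟩ := pv_upper_bounds h
    constructor
    · intro he
      have := congrArg Char.toNat he
      rw [pv_toNat_ofNat_upper h] at this
      exfalso; revert this
      have : ('_' : Char).toNat = 95 := by decide
      omega
    · intro he; subst he; exact absurd h2 (by decide)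
  · exact Iff.rfl

theorem pv_lowerChar_mem_alpha {c : Char} (h : PySem.Chars.isalpha c = true) :
    PySem.Chars.lowerChar c ∈ pvAlpha := by
  unfold PySem.Chars.isalpha at h
  unfold PySem.Chars.lowerChar
  rcases Bool.or_eq_true_iff.mp h with hu | hl
  · rw [if_pos hu, pv_mem_alpha_iff, pv_toNat_ofNat_upper hu]
    obtain ⟨h1, h2⟩ := pv_upper_bounds hu
    omega
  · obtain ⟨h1, h2⟩ := pv_lower_bounds hl
    split_ifs with hu
    · obtain ⟨h3, h4⟩ := pv_upper_bounds hu; omega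
    · rw [pv_mem_alpha_iff]; omega

theorem pv_count_us_lower (xs : List Char) :
    (PySem.Chars.lower xs).count '_' = xs.count '_' := by
  unfold PySem.Chars.lower
  simp only [List.count_eq_countP, List.countP_map]
  apply List.countP_congr
  intro x _
  simp [Function.comp, pv_lowerChar_us_iff]

-- ---- decomposing a list with exactly two '_' ----

theorem pv_split_first (l : List Char) (h : 0 < l.count '_') :
    ∃ p q, l = p ++ '_' :: q ∧ '_' ∉ p ∧ q.count '_' = l.count '_' - 1 := by
  induction l with
  | nil => simp at h
  | cons a t ih =>
      by_cases ha : a = '_'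
      · subst ha
        exact ⟨[], t, by simp⟩
      · have ht : 0 < t.count '_' := by
          rw [List.count_cons] at h; simpa [ha] using h
        obtain ⟨p, q, hpq, hp, hq⟩ := ih ht
        refine ⟨a :: p, q, by simp [hpq], ?_, ?_⟩
        · simp [hp, Ne.symm ha]
        · rw [List.count_cons]; simp [ha, hq]

theorem pv_decompose (l : List Char) (h : l.count '_' = 2) :
    ∃ p0 p1 p2, l = p0 ++ '_' :: (p1 ++ '_' :: p2) ∧ '_' ∉ p0 ∧ '_' ∉ p1 ∧ '_' ∉ p2 := by
  obtain ⟨p0, q, hl0, hp0, hq⟩ := pv_split_first l (by omega)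
  rw [h] at hq; norm_num at hq
  obtain ⟨p1, p2, hq1, hp1, hq2⟩ := pv_split_first q (by rw [hq]; omega)
  rw [hq] at hq2; norm_num at hq2
  rw [hq1] at hl0
  exact ⟨p0, p1, p2, hl0, hp0, hp1, List.count_eq_zero.mp hq2⟩

-- ---- A's split: Chars.splitOn on a string with exactly two separators ----

theorem pv_go_nil (f : Nat) (cur : List Char) (acc : List (List Char)) :
    PySem.Chars.splitOn.go ['_'] f [] cur acc = (cur.reverse :: acc).reverse := by
  cases f <;> simp [PySem.Chars.splitOn.go]

theorem pv_go_sep (f : Nat) (l cur : List Char) (acc : List (List Char)) :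
    PySem.Chars.splitOn.go ['_'] (f+1) ('_'::l) cur acc
      = PySem.Chars.splitOn.go ['_'] f l [] (cur.reverse :: acc) := by
  simp [PySem.Chars.splitOn.go, List.isPrefixOf]

theorem pv_go_seg (p : List Char) : ∀ (f : Nat) (l cur : List Char) (acc : List (List Char)), '_' ∉ p →
    PySem.Chars.splitOn.go ['_'] (p.length + f) (p ++ l) cur acc
      = PySem.Chars.splitOn.go ['_'] f l (p.reverse ++ cur) acc := by
  induction p with
  | nil => intro f l cur acc _; simp
  | cons c rest ih =>
      intro f l cur acc h
      have hc : c ≠ '_' := fun hh => h (hh ▸ List.mem_cons_self ..)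
      simp only [List.length_cons, List.cons_append]
      have hstep : PySem.Chars.splitOn.go ['_'] (rest.length + f + 1) (c :: (rest ++ l)) cur acc
          = PySem.Chars.splitOn.go ['_'] (rest.length + f) (rest ++ l) (c :: cur) acc := by
        simp [PySem.Chars.splitOn.go, List.isPrefixOf, Ne.symm hc]
      rw [show rest.length + 1 + f = rest.length + f + 1 by omega, hstep,
        ih _ _ _ _ (fun hh => h (List.mem_cons_of_mem _ hh))]
      simp

theorem pv_go_last (p : List Char) : ∀ (f : Nat) (cur : List Char) (acc : List (List Char)), '_' ∉ p →
    PySem.Chars.splitOn.go ['_'] (p.length + f) p cur acc = ((p.reverse ++ cur).reverse :: acc).reverse := by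
  induction p with
  | nil => intro f cur acc _; simpa using pv_go_nil f cur acc
  | cons c rest ih =>
      intro f cur acc h
      have hc : c ≠ '_' := fun hh => h (hh ▸ List.mem_cons_self ..)
      have hstep : PySem.Chars.splitOn.go ['_'] (rest.length + f + 1) (c :: rest) cur acc
          = PySem.Chars.splitOn.go ['_'] (rest.length + f) rest (c :: cur) acc := by
        simp [PySem.Chars.splitOn.go, List.isPrefixOf, Ne.symm hc]
      rw [show (c :: rest).length + f = rest.length + f + 1 by simp; omega, hstep,
        ih _ _ _ (fun hh => h (List.mem_cons_of_mem _ hh))]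
      simp

theorem pv_splitOn_three (p0 p1 p2 : List Char)
    (h0 : '_' ∉ p0) (h1 : '_' ∉ p1) (h2 : '_' ∉ p2) :
    PySem.Chars.splitOn (p0 ++ '_' :: (p1 ++ '_' :: p2)) ['_'] = [p0, p1, p2] := by
  unfold PySem.Chars.splitOn
  have hlen : (p0 ++ '_' :: (p1 ++ '_' :: p2)).length + 1
      = p0.length + (((p1.length + ((p2.length + 1) + 1))) + 1) := by
    simp; omega
  rw [hlen, pv_go_seg p0 _ _ _ _ h0, pv_go_sep, pv_go_seg p1 _ _ _ _ h1, pv_go_sep,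
    pv_go_last p2 _ _ _ h2]
  simp

-- ---- B's streaming pass: characterisation of the dict after each segment ----

-- proof-only abbreviation: the distinct-part count pvStep stores for c when it meets c in part k
def pvCnt (d : PySem.Dict Char (Int × Int)) (c : Char) (k : Int) : Int :=
  ((d.get? c).getD (-1, 0)).2 + (if ((d.get? c).getD (-1, 0)).1 = k then 0 else 1)

theorem pvStep_us (s : PySem.Dict Char (Int × Int) × Int) : pvStep s '_' = (s.1, s.2 + 1) := by
  simp [pvStep]

theorem pvSeg (p : List Char) : ∀ (d : PySem.Dict Char (Int × Int)) (k : Int), '_' ∉ p → 0 ≤ k →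
    (p.foldl pvStep (d, k)).2 = k ∧
    ∀ c, (p.foldl pvStep (d, k)).1.get? c = if c ∈ p then some (k, pvCnt d c k) else d.get? c := by
  induction p with
  | nil => intro d k _ _; simp
  | cons c0 rest ih =>
      intro d k h hk
      have hc0 : c0 ≠ '_' := fun hh => h (hh ▸ List.mem_cons_self ..)
      have hrest : '_' ∉ rest := fun hh => h (List.mem_cons_of_mem _ hh)
      by_cases hfire : ((d.get? c0).getD (-1, 0)).1 = k
      · -- the stored last part is already k: no update
        have hsome : d.get? c0 = some (k, ((d.get? c0).getD (-1,0)).2) := by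
          cases hd : d.get? c0 with
          | none => exfalso; rw [hd] at hfire; simp at hfire; omega
          | some v => rw [hd] at hfire; simp at hfire; simp [← hfire]
        have hstep : pvStep (d, k) c0 = (d, k) := by
          simp [pvStep, hc0, hfire]
        rw [List.foldl_cons, hstep]
        obtain ⟨h2, hget⟩ := ih d k hrest hk
        refine ⟨h2, fun c => ?_⟩
        rw [hget c]
        by_cases hcr : c ∈ rest
        · simp [hcr, pvCnt]
        · by_cases hcc : c = c0
          · subst hcc
            simp only [hcr, if_false, List.mem_cons, true_or, if_true]
            rw [hsome]
            simp [pvCnt, hfire]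
          · simp [hcr, hcc]
      · -- first visit of c0 in part k: record (k, cnt + 1)
        have hstep : pvStep (d, k) c0 = (d.insert c0 (k, ((d.get? c0).getD (-1,0)).2 + 1), k) := by
          simp [pvStep, hc0, hfire]
        rw [List.foldl_cons, hstep]
        obtain ⟨h2, hget⟩ := ih (d.insert c0 (k, ((d.get? c0).getD (-1,0)).2 + 1)) k hrest hk
        refine ⟨h2, fun c => ?_⟩
        rw [hget c]
        by_cases hcc : c = c0
        · subst hcc
          by_cases hcr : c ∈ rest
          · simp only [hcr, if_true, List.mem_cons, or_true, if_true]
            congr 2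
            simp [pvCnt, PySem.Dict.get?_insert_self, hfire]
          · simp [hcr, List.mem_cons, PySem.Dict.get?_insert_self, pvCnt, hfire]
        · rw [PySem.Dict.get?_insert_of_ne _ _ hcc]
          have : pvCnt (d.insert c0 (k, ((d.get? c0).getD (-1,0)).2 + 1)) c k = pvCnt d c k := by
            simp [pvCnt, PySem.Dict.get?_insert_of_ne _ _ hcc]
          simp [this, List.mem_cons, hcc]

-- B's per-letter test after the whole pass = membership in all three parts
theorem pv_cond (p0 p1 p2 : List Char)
    (h0 : '_' ∉ p0) (h1 : '_' ∉ p1) (h2 : '_' ∉ p2) (c : Char) :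
    (((p0 ++ '_' :: (p1 ++ '_' :: p2)).foldl pvStep (PySem.Dict.empty, 0)).1.contains c &&
      ((((p0 ++ '_' :: (p1 ++ '_' :: p2)).foldl pvStep (PySem.Dict.empty, 0)).1.get? c).getD (-1, 0)).2 == 3)
    = (decide (c ∈ p0) && decide (c ∈ p1) && decide (c ∈ p2)) := by
  obtain ⟨hA2, hA⟩ := pvSeg p0 PySem.Dict.empty 0 h0 (by norm_num)
  obtain ⟨hB2, hB⟩ := pvSeg p1 (p0.foldl pvStep (PySem.Dict.empty, 0)).1 1 h1 (by norm_num)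
  obtain ⟨hC2, hC⟩ := pvSeg p2
    (p1.foldl pvStep ((p0.foldl pvStep (PySem.Dict.empty, 0)).1, 1)).1 2 h2 (by norm_num)
  have e1 : (p0 ++ '_' :: (p1 ++ '_' :: p2)).foldl pvStep (PySem.Dict.empty, 0)
      = (p1 ++ '_' :: p2).foldl pvStep ((p0.foldl pvStep (PySem.Dict.empty, 0)).1, 1) := by
    rw [List.foldl_append, List.foldl_cons, pvStep_us, hA2]; norm_num
  have e2 : (p1 ++ '_' :: p2).foldl pvStep ((p0.foldl pvStep (PySem.Dict.empty, 0)).1, 1)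
      = p2.foldl pvStep ((p1.foldl pvStep ((p0.foldl pvStep (PySem.Dict.empty, 0)).1, 1)).1, 2) := by
    rw [List.foldl_append, List.foldl_cons, pvStep_us, hB2]; norm_num
  rw [e1, e2, PySem.Dict.contains_eq_isSome_get?, hC c]
  by_cases hm0 : c ∈ p0 <;> by_cases hm1 : c ∈ p1 <;> by_cases hm2 : c ∈ p2 <;>
    simp [hm0, hm1, hm2, hB, hA, pvCnt, PySem.Dict.get?_empty]

-- ---- chars of the lowered string that land in a part are letters a-z ----

theorem pv_part_sub_alpha (my_str : String)
    (hall : ∀ c ∈ my_str.toList, (PySem.Chars.isalpha c || c == '_') = true)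
    {c : Char} (hcL : c ∈ PySem.Chars.lower my_str.toList) (hcus : c ≠ '_') :
    c ∈ pvAlpha := by
  unfold PySem.Chars.lower at hcL
  obtain ⟨x, hx, hxc⟩ := List.mem_map.mp hcL
  have := hall x hx
  rcases Bool.or_eq_true_iff.mp this with ha | hus
  · exact hxc ▸ pv_lowerChar_mem_alpha ha
  · exfalso
    apply hcus
    rw [← hxc, pv_lowerChar_us_iff]
    simpa using hus

-- ---- main equivalence ----

theorem pv_main (my_str : String) (hpre : Pre_intersecting_chars my_str) :
    intersecting_chars my_str = intersecting_chars_alt my_str := by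
  obtain ⟨hcount, hallb⟩ := hpre
  have hall : ∀ c ∈ my_str.toList, (PySem.Chars.isalpha c || c == '_') = true :=
    List.all_eq_true.mp hallb
  have hLcount : (PySem.Chars.lower my_str.toList).count '_' = 2 := by
    rw [pv_count_us_lower]; exact hcount
  obtain ⟨p0, p1, p2, hL, h0, h1, h2⟩ := pv_decompose _ hLcount
  -- the split in A
  have htosep : ("_" : String).toList = ['_'] := by decide
  have hsplit : PySem.Str.split? (PySem.Str.lower my_str) "_"
      = some ([p0, p1, p2].map String.ofList) := by
    show Option.map _ (PySem.Chars.split? (PySem.Str.lower my_str).toList ("_").toList) = _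
    rw [htosep]
    have : (PySem.Str.lower my_str).toList = PySem.Chars.lower my_str.toList := by
      simp [PySem.Str.toList_lower]
    rw [this, hL]
    unfold PySem.Chars.split?
    rw [if_neg (by simp), pv_splitOn_three p0 p1 p2 h0 h1 h2]
    rfl
  -- B's loop input
  have hLB : (PySem.Str.lower my_str).toList = p0 ++ '_' :: (p1 ++ '_' :: p2) := by
    rw [PySem.Str.toList_lower, hL]
  unfold intersecting_chars intersecting_chars_alt
  rw [hsplit, hLB]
  simp only [Option.getD_some, List.map_cons, List.map_nil, List.foldl_cons, List.foldl_nil]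
  -- identify the intersection on A's side
  have hmem_inter : ∀ c : Char,
      c ∈ PySem.Set.inter (PySem.Set.inter (PySem.Set.ofList (String.ofList p0).toList)
            (PySem.Set.ofList (String.ofList p1).toList)) (PySem.Set.ofList (String.ofList p2).toList)
        ↔ (c ∈ p0 ∧ c ∈ p1 ∧ c ∈ p2) := by
    intro c
    rw [PySem.Set.mem_inter, PySem.Set.mem_inter, PySem.Set.mem_ofList, PySem.Set.mem_ofList,
      PySem.Set.mem_ofList]
    simp [String.toList_ofList, and_assoc]
  -- the two char-lists agree
  have hfilter : PySem.List.sorted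
      (PySem.Set.inter (PySem.Set.inter (PySem.Set.ofList (String.ofList p0).toList)
        (PySem.Set.ofList (String.ofList p1).toList)) (PySem.Set.ofList (String.ofList p2).toList))
      (fun c => c)
      = pvAlpha.filter (fun c =>
          (((p0 ++ '_' :: (p1 ++ '_' :: p2)).foldl pvStep (PySem.Dict.empty, 0)).1.contains c &&
          ((((p0 ++ '_' :: (p1 ++ '_' :: p2)).foldl pvStep (PySem.Dict.empty, 0)).1.get? c).getD (-1, 0)).2 == 3)) := by
    apply PySem.List.sorted_eq_of_perm_of_pairwise_lt
    · rw [List.perm_ext_iff_of_nodup]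
      · intro c
        rw [List.mem_filter, pv_cond p0 p1 p2 h0 h1 h2 c, hmem_inter c]
        simp only [Bool.and_eq_true, decide_eq_true_eq]
        constructor
        · rintro ⟨hca, hcc⟩; tauto
        · intro hc
          have hcp0 : c ∈ p0 := hc.1
          refine ⟨pv_part_sub_alpha my_str hall (by rw [hL]; simp [hcp0]) (fun he => h0 (he ▸ hcp0)), ?_⟩
          tauto
      · exact List.Nodup.filter _ (by decide)
      · exact PySem.Set.nodup_inter _ _ (PySem.Set.nodup_inter _ _ (PySem.Set.nodup_ofList _))
    · exact List.Pairwise.filter _ (by decide : pvAlpha.Pairwise (· < ·))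
  rw [hfilter]

-- ===== VERDICT (by name: the statement is the Claim_ definition above) =====
theorem intersecting_chars_spec : Claim_equal_intersecting_chars := by
  intro my_str _ hpre
  exact pv_main my_str hpre
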